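-- pv_equiv track=rewrite | github.com/Robbie-Campbell/codewars-challenge | challenge19.py | squaring_loop
-- ===== SOURCE A (Python) =====
-- def squaring_loop(available_cans):
--     cans_used = 0
--     pyramid_levels = 1
--     index = 1
--     while cans_used <= available_cans:
--         if cans_used <= available_cans:
--             index += 1
--         cans_used += index ** 2
--         if cans_used >= available_cans:
--             break
--         pyramid_levels += 1
--     return pyramid_levels if available_cans > 0 else 0
-- ===== SOURCE B (Python) =====
-- def squaring_loop(available_cans):
--     if available_cans <= 0:
--         return 0
--     # cans consumed by a full pyramid of j levels under the index-starting-at-2 scheme: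
--     # sum of k^2 for k = 2 .. j+1  =  (j+1)(j+2)(2j+3)//6 - 1
--     def filled(j):
--         return (j + 1) * (j + 2) * (2 * j + 3) // 6 - 1
--     lo, hi = 1, available_cans
--     while lo < hi:
--         mid = (lo + hi) // 2
--         if filled(mid) >= available_cans:
--             hi = mid
--         else:
--             lo = mid + 1
--     return lo
-- ===== Notes on version B (the rewrite author's own statement) =====
-- stated objective: alternative
-- what changed: Replaces A's one-level-at-a-time accumulation loop by the closed-form pyramid size (a cubic polynomial with integer floor division) combined with an integer binary search for the least level count meeting the budget.
import Mathlib
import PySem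

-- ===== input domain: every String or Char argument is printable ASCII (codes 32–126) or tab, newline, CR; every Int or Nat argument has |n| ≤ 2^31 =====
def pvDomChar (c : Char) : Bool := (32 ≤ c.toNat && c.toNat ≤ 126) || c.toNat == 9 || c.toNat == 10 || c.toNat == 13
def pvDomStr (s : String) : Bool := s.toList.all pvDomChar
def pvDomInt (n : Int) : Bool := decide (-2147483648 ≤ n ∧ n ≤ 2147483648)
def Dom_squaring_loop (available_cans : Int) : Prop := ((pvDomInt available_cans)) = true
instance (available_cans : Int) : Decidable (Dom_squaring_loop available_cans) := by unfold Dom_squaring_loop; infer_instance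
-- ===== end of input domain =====

-- B replaces A's one-level-at-a-time accumulation loop by the sum-of-squares closed form plus an
-- integer binary search for the least sufficient level count (objective: alternative algorithm, exact integer arithmetic).

-- ===== PORT A =====
-- the while-loop of A, state (cans_used, pyramid_levels, index); break returns pyramid_levels
def pvALoop (available_cans cans_used pyramid_levels index : Int) : Int :=
  if cans_used ≤ available_cans then
    let index1 := if cans_used ≤ available_cans then index + 1 else index
    let cans1 := cans_used + index1 ^ 2
    if cans1 ≥ available_cans then pyramid_levels
    else pvALoop available_cans cans1 (pyramid_levels + 1) index1
  else pyramid_levels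
termination_by ((available_cans - cans_used).toNat, (1 - index).toNat)
decreasing_by
  rename_i h1 h2
  have h2' : cans_used + (if h : cans_used ≤ available_cans then index + 1 else index) ^ 2 < available_cans := by
    simpa [cans1, index1] using h2
  rw [dif_pos h1] at h2'
  rw [dif_pos h1]
  by_cases hi : index = -1
  · subst hi
    have e1 : ((-1:Int) + 1) ^ 2 = 0 := by norm_num
    rw [e1, add_zero]
    exact Prod.Lex.right _ (by decide)
  · apply Prod.Lex.left
    have hne : index + 1 ≠ 0 := by omega
    have hsq : 0 < (index + 1) ^ 2 :=
      lt_of_le_of_ne (sq_nonneg _) (Ne.symm (pow_ne_zero 2 hne))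
    omega

def squaring_loop (available_cans : Int) : Int :=
  let r := pvALoop available_cans 0 1 1
  if available_cans > 0 then r else 0

-- ===== PORT B =====
-- cans consumed by a full pyramid of j levels: sum of k^2, k = 2..j+1 = (j+1)(j+2)(2j+3)//6 - 1
def pvFilled (j : Int) : Int :=
  PySem.Int.floordiv ((j + 1) * (j + 2) * (2 * j + 3)) 6 - 1

-- Source B's while-loop: binary search for the least level count whose full pyramid meets the budget
def pvBSearch (available_cans lo hi : Int) : Int :=
  if lo < hi then
    let mid := PySem.Int.floordiv (lo + hi) 2
    if pvFilled mid ≥ available_cans then pvBSearch available_cans lo mid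
    else pvBSearch available_cans (mid + 1) hi
  else lo
termination_by (hi - lo).toNat
decreasing_by
  all_goals
    rename_i h _
    have h2 := PySem.Int.floordiv_two_mid_bounds (le_of_lt h)
    have h3 : PySem.Int.floordiv (lo + hi) 2 < hi :=
      (PySem.Int.floordiv_lt_iff_lt_mul (by omega)).2 (by omega)
    omega

def squaring_loop_alt (available_cans : Int) : Int :=
  if available_cans ≤ 0 then 0
  else pvBSearch available_cans 1 available_cans

-- ===== PRECONDITION & SPEC =====
def Spec_squaring_loop (available_cans : Int) (out : Int) : Prop := out = squaring_loop_alt available_cans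
instance (available_cans : Int) (out : Int) : Decidable (Spec_squaring_loop available_cans out) := by unfold Spec_squaring_loop; infer_instance

-- ===== CLAIM (what is proved, stated in full; the proofs are below) =====
def Claim_equal_squaring_loop : Prop := ∀ (available_cans : Int), Dom_squaring_loop available_cans → Spec_squaring_loop available_cans (squaring_loop available_cans)

-- ===== LEMMAS AND PROOFS =====

theorem pvFilled_zero : pvFilled 0 = 0 := by decide

theorem pvFilled_succ (j : Int) : pvFilled (j + 1) = pvFilled j + (j + 2) ^ 2 := by
  unfold pvFilled
  have h : (j + 1 + 1) * (j + 1 + 2) * (2 * (j + 1) + 3)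
      = (j + 1) * (j + 2) * (2 * j + 3) + (j + 2) ^ 2 * 6 := by ring
  rw [h, PySem.Int.floordiv]
  rw [Int.add_mul_fdiv_right _ _ (by norm_num : (6:Int) ≠ 0)]
  rw [PySem.Int.floordiv]
  ring

theorem pvFilled_lt_succ (j : Int) (h : 0 ≤ j) : pvFilled j < pvFilled (j + 1) := by
  rw [pvFilled_succ]
  have : 0 < (j + 2) ^ 2 := by positivity
  omega

theorem pvFilled_mono (a b : Int) (ha : 0 ≤ a) (hab : a ≤ b) : pvFilled a ≤ pvFilled b := by
  induction b, hab using Int.le_induction with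
  | base => exact le_refl _
  | succ k hk ih => exact le_trans ih (le_of_lt (pvFilled_lt_succ k (le_trans ha hk)))

theorem pvFilled_ge_self (j : Int) (h : 0 ≤ j) : j ≤ pvFilled j := by
  induction j, h using Int.le_induction with
  | base => simp [pvFilled_zero]
  | succ k hk ih =>
      rw [pvFilled_succ]
      have : (4:Int) ≤ (k + 2) ^ 2 := by nlinarith
      omega

-- the characterisation both programs compute: least r ≥ 1 whose full pyramid meets the budget
def pvIsAns (n r : Int) : Prop := 1 ≤ r ∧ n ≤ pvFilled r ∧ pvFilled (r - 1) < n

theorem pvIsAns_unique (n r₁ r₂ : Int) (h₁ : pvIsAns n r₁) (h₂ : pvIsAns n r₂) : r₁ = r₂ := by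
  obtain ⟨ha1, ha2, ha3⟩ := h₁
  obtain ⟨hb1, hb2, hb3⟩ := h₂
  by_contra hne
  rcases lt_or_gt_of_ne hne with h | h
  · have := pvFilled_mono r₁ (r₂ - 1) (by omega) (by omega); omega
  · have := pvFilled_mono r₂ (r₁ - 1) (by omega) (by omega); omega

theorem pvBSearch_spec (n lo hi : Int) (h1 : 1 ≤ lo) (h2 : lo ≤ hi)
    (h3 : pvFilled (lo - 1) < n) (h4 : n ≤ pvFilled hi) :
    pvIsAns n (pvBSearch n lo hi) := by
  rw [pvBSearch]
  by_cases hlt : lo < hi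
  · rw [if_pos hlt]
    have hmid := PySem.Int.floordiv_two_mid_bounds (le_of_lt hlt)
    have hmlt : PySem.Int.floordiv (lo + hi) 2 < hi :=
      (PySem.Int.floordiv_lt_iff_lt_mul (by omega)).2 (by omega)
    by_cases hc : pvFilled (PySem.Int.floordiv (lo + hi) 2) ≥ n
    · rw [if_pos hc]
      exact pvBSearch_spec n lo _ h1 (by omega) h3 hc
    · rw [if_neg hc]
      exact pvBSearch_spec n _ hi (by omega) (by omega) (by simpa using not_le.1 hc) h4
  · rw [if_neg hlt]
    have : lo = hi := by omega
    exact ⟨h1, this ▸ h4, h3⟩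
termination_by (hi - lo).toNat
decreasing_by
  · have := PySem.Int.floordiv_two_mid_bounds (le_of_lt hlt); omega
  · omega

theorem pvALoop_spec (n : Int) (j : Nat) (hj : pvFilled j < n) :
    pvIsAns n (pvALoop n (pvFilled j) (j + 1) (j + 1)) := by
  unfold pvALoop
  have hle : pvFilled (j : Int) ≤ n := le_of_lt hj
  rw [if_pos hle]
  simp only [if_pos hle]
  have hcans : pvFilled (j : Int) + ((j : Int) + 1 + 1) ^ 2 = pvFilled ((j : Int) + 1) := by
    rw [pvFilled_succ]; ring
  by_cases hb : pvFilled (j : Int) + ((j : Int) + 1 + 1) ^ 2 ≥ n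
  · rw [if_pos hb]
    refine ⟨by omega, ?_, by simpa using hj⟩
    rw [← hcans]; omega
  · rw [if_neg hb]
    have hrec := pvALoop_spec n (j + 1) (by push_cast; rw [← hcans]; omega)
    push_cast at hrec ⊢
    rw [hcans]
    convert hrec using 3
termination_by (n - pvFilled j).toNat
decreasing_by
  have hpos : (0:Int) < ((j:Int) + 1 + 1) ^ 2 := by positivity
  have : pvFilled ((j : Int) + 1) = pvFilled (j : Int) + ((j:Int) + 1 + 1) ^ 2 := by
    rw [pvFilled_succ]; ring
  push_cast
  omega

-- ===== VERDICT (by name: the statement is the Claim_ definition above) =====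
theorem squaring_loop_spec : Claim_equal_squaring_loop := by
  intro n _
  unfold Spec_squaring_loop squaring_loop squaring_loop_alt
  by_cases hn : n > 0
  · rw [if_pos hn, if_neg (by omega)]
    have hA : pvIsAns n (pvALoop n 0 1 1) := by
      have := pvALoop_spec n 0 (by simpa [pvFilled_zero] using hn)
      simpa [pvFilled_zero] using this
    have hB : pvIsAns n (pvBSearch n 1 n) := by
      refine pvBSearch_spec n 1 n (le_refl _) (by omega) (by simpa [pvFilled_zero] using hn) ?_
      exact le_trans (by omega) (pvFilled_ge_self n (by omega))
    exact pvIsAns_unique n _ _ hA hB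
  · rw [if_neg hn, if_pos (by omega)]
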